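-- pv_equiv track=rewrite | github.com/lennart-finke/dhis2 | dhis2_utils.py | compute_leaf_paths_from_unique_paths
-- ===== SOURCE A (Python) =====
-- from typing import Iterable, Sequence
--
-- def compute_leaf_paths_from_unique_paths(
--     paths: Iterable[tuple[str, ...]],
-- ) -> set[tuple[str, ...]]:
--     """
--     Given an iterable of hierarchy paths, compute which paths are leaves.
--
--     A path is an internal node if it is a proper prefix of any other path.
--     Leaves are those that are not proper prefixes.
--     """
--     path_set: set[tuple[str, ...]] = set()
--     internal: set[tuple[str, ...]] = set()
--
--     for p in paths:
--         if not p: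
--             continue
--         path_set.add(p)
--
--     for p in path_set:
--         # Mark every proper prefix as internal
--         for i in range(1, len(p)):
--             internal.add(p[:i])
--
--     return path_set - internal
-- ===== SOURCE B (Python) =====
-- def compute_leaf_paths_from_unique_paths(paths):
--     """Sort the distinct non-empty paths; a path is internal iff its immediate
--     successor in sorted order extends it (any extension sorts between the two)."""
--     uniq = list(dict.fromkeys(p for p in paths if p))
--     s = sorted(uniq)
--     internal = {p for p, q in zip(s, s[1:]) if q[:len(p)] == p}
--     return set(uniq) - internal
-- ===== Notes on version B (the rewrite author's own statement) =====
-- stated objective: faster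
-- what changed: Instead of inserting every proper prefix of every path into an 'internal' set (O(total_length^2) slice hashing), B sorts the distinct paths once and marks a path internal iff its immediate sorted successor extends it, then subtracts.
import Mathlib
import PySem

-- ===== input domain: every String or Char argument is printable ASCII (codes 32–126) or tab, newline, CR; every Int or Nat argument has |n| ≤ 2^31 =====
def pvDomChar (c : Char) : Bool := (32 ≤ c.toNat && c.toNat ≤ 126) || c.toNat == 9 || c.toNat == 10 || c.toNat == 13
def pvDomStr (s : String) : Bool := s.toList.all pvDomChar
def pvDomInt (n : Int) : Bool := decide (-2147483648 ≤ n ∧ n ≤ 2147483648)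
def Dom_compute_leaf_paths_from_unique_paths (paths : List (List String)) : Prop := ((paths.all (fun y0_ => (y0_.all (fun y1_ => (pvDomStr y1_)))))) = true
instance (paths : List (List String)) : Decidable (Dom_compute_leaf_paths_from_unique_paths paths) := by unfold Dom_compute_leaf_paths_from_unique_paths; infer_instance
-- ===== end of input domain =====

-- B replaces A's "insert every proper prefix of every path" set with one sort of the
-- distinct paths plus an adjacent-successor prefix test (objective: faster).
-- Both Pythons return a set (compared as a set); the ports agree as lists because both
-- produce the distinct leaves in first-insertion order.

-- ===== PORT A =====
def compute_leaf_paths_from_unique_paths (paths : List (List String)) : List (List String) :=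
  let path_set := paths.foldl (fun s p => if p.isEmpty then s else PySem.Set.add s p) PySem.Set.empty
  let internal := path_set.foldl (fun acc p =>
      (PySem.List.pyRange 1 (p.length : Int) 1).foldl
        (fun acc2 i => PySem.Set.add acc2 (PySem.List.slice p none (some i))) acc)
    PySem.Set.empty
  PySem.Set.diff path_set internal

-- ===== PORT B =====
-- string comparison is done on the List-Char side (Python's code-point order, exact)
def pvKey (p : List String) : List (List Char) := p.map String.toList

def compute_leaf_paths_from_unique_paths_alt (paths : List (List String)) : List (List String) :=
  let uniq := PySem.List.dedup (paths.filter (fun p => !p.isEmpty))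
  let s := PySem.List.sorted uniq pvKey false
  let internal := PySem.Set.ofList
    (((s.zip (PySem.List.slice s (some 1) none)).filter
        (fun pq => PySem.List.slice pq.2 none (some (pq.1.length : Int)) = pq.1)).map (fun pq => pq.1))
  PySem.Set.diff (PySem.Set.ofList uniq) internal

-- ===== PRECONDITION & SPEC =====
def Spec_compute_leaf_paths_from_unique_paths (paths : List (List String)) (out : List (List String)) : Prop := out = compute_leaf_paths_from_unique_paths_alt paths
instance (paths : List (List String)) (out : List (List String)) : Decidable (Spec_compute_leaf_paths_from_unique_paths paths out) := by unfold Spec_compute_leaf_paths_from_unique_paths; infer_instance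

-- ===== CLAIM (what is proved, stated in full; the proofs are below) =====
def Claim_equal_compute_leaf_paths_from_unique_paths : Prop := ∀ (paths : List (List String)), Dom_compute_leaf_paths_from_unique_paths paths → Spec_compute_leaf_paths_from_unique_paths paths (compute_leaf_paths_from_unique_paths paths)

-- ===== LEMMAS AND PROOFS =====

-- A's first loop is Set.ofList of the non-empty paths
theorem pv_foldl_skip (paths : List (List String)) (s : PySem.Set (List String)) :
    paths.foldl (fun s p => if p.isEmpty then s else PySem.Set.add s p) s
      = (paths.filter (fun p => !p.isEmpty)).foldl PySem.Set.add s := by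
  induction paths generalizing s with
  | nil => rfl
  | cons p t ih =>
      rw [List.foldl_cons, List.filter_cons, ih]
      by_cases hp : p.isEmpty <;> simp [hp, List.foldl_cons]

theorem pv_mem_foldl_update {α β : Type} [BEq α] [LawfulBEq α]
    (l : List β) (g : β → List α) (s : PySem.Set α) (y : α) :
    y ∈ l.foldl (fun s b => PySem.Set.update s (g b)) s ↔ y ∈ s ∨ ∃ b ∈ l, y ∈ g b := by
  induction l generalizing s with
  | nil => simp
  | cons b t ih =>
      simp only [List.foldl_cons, ih, PySem.Set.mem_update, List.mem_cons]
      constructor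
      · rintro ((h | h) | ⟨c, hc, hy⟩)
        · exact Or.inl h
        · exact Or.inr ⟨b, Or.inl rfl, h⟩
        · exact Or.inr ⟨c, Or.inr hc, hy⟩
      · rintro (h | ⟨c, (rfl | hc), hy⟩)
        · exact Or.inl (Or.inl h)
        · exact Or.inl (Or.inr hy)
        · exact Or.inr ⟨c, hc, hy⟩

-- q[:len(p)] == p  is  "p is a prefix of q"
theorem pv_slice_pred_iff (a b : List String) :
    PySem.List.slice b none (some ((a.length : Nat) : Int)) = a ↔ a <+: b := by
  rw [PySem.List.slice_to_natCast b a.length, List.prefix_iff_eq_take, eq_comm]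

-- the inner range loop of A enumerates exactly the proper prefixes (x nonempty)
theorem pv_range_prefix_iff (p x : List String) (hx : x ≠ []) :
    (∃ i ∈ PySem.List.pyRange 1 (p.length : Int) 1, x = PySem.List.slice p none (some i))
      ↔ (x <+: p ∧ x ≠ p) := by
  constructor
  · rintro ⟨i, hi, rfl⟩
    rw [PySem.List.mem_pyRange_one] at hi
    rw [PySem.List.slice_to p (by omega)]
    refine ⟨List.take_prefix _ _, ?_⟩
    intro h
    have hlen : (List.take i.toNat p).length = p.length := by rw [h]
    rw [List.length_take] at hlen
    omega
  · rintro ⟨hpre, hne⟩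
    refine ⟨(x.length : Int), ?_, ?_⟩
    · rw [PySem.List.mem_pyRange_one]
      have h1 : 0 < x.length := List.length_pos_of_ne_nil hx
      have h2 : x.length ≤ p.length := hpre.length_le
      have h3 : x.length ≠ p.length := fun h => hne (hpre.eq_of_length h)
      omega
    · rw [PySem.List.slice_to p (by omega)]
      simpa using List.prefix_iff_eq_take.mp hpre

-- lexicographic-order facts --------------------------------------------------
theorem pv_lt_of_prefix_ne {β : Type} [LinearOrder β] {p q : List β}
    (h : p <+: q) (hne : p ≠ q) : p < q := by
  obtain ⟨t, rfl⟩ := h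
  have ht : t ≠ [] := by rintro rfl; simp at hne
  clear hne
  show List.Lex (· < ·) p (p ++ t)
  induction p with
  | nil =>
      cases t with
      | nil => exact absurd rfl ht
      | cons a t' => exact List.Lex.nil
  | cons a p' ih => exact List.Lex.cons ih

theorem pv_lex_between_aux {β : Type} [LinearOrder β] {p s : List β}
    (h1 : List.Lex (· < ·) p s) : ∀ q : List β, s ≤ q → p <+: q → p <+: s := by
  induction h1 with
  | nil => exact fun _ _ _ => List.nil_prefix
  | @cons a l1 l2 h ih =>
      intro q h2 h3
      obtain ⟨q', rfl, hq'⟩ : ∃ q', q = a :: q' ∧ l1 <+: q' := by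
        cases q with
        | nil => simp at h3
        | cons b q' =>
            rw [List.cons_prefix_cons] at h3
            exact ⟨q', by rw [h3.1], h3.2⟩
      have h2' : l2 ≤ q' := by
        by_contra hlt
        rw [not_le] at hlt
        have : (a :: q') < (a :: l2) := List.Lex.cons hlt
        exact absurd this (not_lt.mpr h2)
      exact List.cons_prefix_cons.mpr ⟨rfl, ih q' h2' hq'⟩
  | @rel a l1 b l2 hab =>
      intro q h2 h3
      exfalso
      obtain ⟨q', rfl⟩ : ∃ q', q = a :: q' := by
        cases q with
        | nil => simp at h3
        | cons c q' =>
            rw [List.cons_prefix_cons] at h3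
            exact ⟨q', by rw [h3.1]⟩
      rcases lt_or_eq_of_le h2 with hlt | heq
      · replace hlt : List.Lex (fun x y : β => x < y) (b :: l2) (a :: q') := hlt
        cases hlt with
        | cons _ => exact lt_irrefl _ hab
        | rel h => exact lt_asymm hab h
      · injection heq with hba _
        rw [hba] at hab
        exact lt_irrefl _ hab

theorem pv_key_injective : Function.Injective pvKey :=
  List.map_injective_iff.mpr (fun _ _ h => String.toList_injective h)

theorem pv_prefix_map_iff (a b : List String) : pvKey a <+: pvKey b ↔ a <+: b := by
  constructor
  · intro h
    have h1 := List.prefix_iff_eq_take.mp h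
    simp only [pvKey, List.length_map, ← List.map_take] at h1
    have h2 : a = b.take a.length := pv_key_injective h1
    rw [h2]; exact List.take_prefix _ _
  · exact fun h => h.map _

theorem pv_R_of_prefix_ne {a b : List String} (h : a <+: b) (hne : a ≠ b) :
    pvKey a < pvKey b :=
  pv_lt_of_prefix_ne ((pv_prefix_map_iff a b).mpr h) (fun hk => hne (pv_key_injective hk))

theorem pv_R_between {p s q : List String} (h1 : pvKey p < pvKey s)
    (h2 : pvKey s ≤ pvKey q) (h3 : p <+: q) : p <+: s :=
  (pv_prefix_map_iff p s).mp
    (pv_lex_between_aux h1 (pvKey q) h2 ((pv_prefix_map_iff p q).mpr h3))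

-- in a strictly key-increasing list, "some member properly extends x" is
-- "x's immediate successor extends x"
theorem pv_succ_char (s : List (List String))
    (hp : s.Pairwise (fun a b => pvKey a < pvKey b)) :
    ∀ x ∈ s, ((∃ q ∈ s, x <+: q ∧ x ≠ q)
      ↔ ∃ pq ∈ s.zip s.tail, pq.1 = x ∧ x <+: pq.2) := by
  induction s with
  | nil => intro x hx; simp at hx
  | cons a s' ih =>
      rcases List.pairwise_cons.mp hp with ⟨ha, hp'⟩
      intro x hx
      cases s' with
      | nil =>
          rcases List.mem_singleton.mp hx with rfl
          constructor
          · rintro ⟨q, hq, hpre, hne⟩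
            rcases List.mem_singleton.mp hq with rfl
            exact absurd rfl hne
          · rintro ⟨pq, hpq, -, -⟩
            simp at hpq
      | cons r t =>
          have hzip : (a :: r :: t).zip (a :: r :: t).tail
              = (a, r) :: (r :: t).zip t := rfl
          rcases List.mem_cons.mp hx with rfl | hx'
          · -- x is the head a
            constructor
            · rintro ⟨q, hq, hpre, hne⟩
              rcases List.mem_cons.mp hq with rfl | hq'
              · exact absurd rfl hne
              · -- q ∈ r :: t;  a's successor r also extends a
                have har : pvKey x < pvKey r := ha r (List.mem_cons_self ..)
                have hrq : pvKey r ≤ pvKey q := by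
                  rcases List.mem_cons.mp hq' with rfl | hq''
                  · exact le_refl _
                  · exact le_of_lt ((List.pairwise_cons.mp hp').1 q hq'')
                exact ⟨(x, r), by rw [hzip]; exact List.mem_cons_self ..,
                  rfl, pv_R_between har hrq hpre⟩
            · rintro ⟨pq, hpq, hfst, hpre⟩
              rw [hzip] at hpq
              rcases List.mem_cons.mp hpq with rfl | hpq'
              · refine ⟨r, List.mem_cons_of_mem _ (List.mem_cons_self ..), hpre, ?_⟩
                intro h
                exact absurd (h ▸ ha r (List.mem_cons_self ..)) (lt_irrefl _)
              · exfalso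
                have h1 : pq.1 ∈ r :: t := (List.of_mem_zip hpq').1
                rw [hfst] at h1
                exact absurd (ha _ h1) (lt_irrefl _)
          · -- x is in the tail r :: t
            have hax : pvKey a < pvKey x := ha x hx'
            have hiff := ih hp' x hx'
            constructor
            · rintro ⟨q, hq, hpre, hne⟩
              rcases List.mem_cons.mp hq with rfl | hq'
              · exact absurd (pv_R_of_prefix_ne hpre hne) (asymm hax)
              · obtain ⟨pq, hpq, hfst, hp2⟩ := hiff.mp ⟨q, hq', hpre, hne⟩
                exact ⟨pq, by rw [hzip]; exact List.mem_cons_of_mem _ hpq, hfst, hp2⟩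
            · rintro ⟨pq, hpq, hfst, hp2⟩
              rw [hzip] at hpq
              rcases List.mem_cons.mp hpq with rfl | hpq'
              · exfalso
                exact absurd (hfst ▸ hax) (lt_irrefl _)
              · obtain ⟨q, hq, h3, h4⟩ := hiff.mpr ⟨pq, hpq', hfst, hp2⟩
                exact ⟨q, List.mem_cons_of_mem _ hq, h3, h4⟩

-- the port's core list-order instances decide the same relation as Mathlib's
-- LinearOrder instances (both are lexicographic List.Lex (· < ·))
theorem pv_lt1 (u v : List Char) : @LT.lt _ (@List.instLT Char Char.instLT) u v ↔ u < v := by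
  constructor
  · intro h; exact (List.lt_iff_lex_lt u v).mp h
  · intro h; exact (List.lt_iff_lex_lt u v).mpr h

theorem pv_lt2 (x y : List (List Char)) :
    @LT.lt _ (@List.instLT (List Char) (@List.instLT Char Char.instLT)) x y ↔ x < y := by
  constructor
  · intro h
    exact List.Lex.imp (fun a b hab => (pv_lt1 a b).mp hab) x y ((List.lt_iff_lex_lt x y).mp h)
  · intro h
    exact (List.lt_iff_lex_lt x y).mpr (List.Lex.imp (fun a b hab => (pv_lt1 a b).mpr hab) x y h)

theorem pv_sorted_eq (xs : List (List String)) :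
    PySem.List.sorted xs pvKey false
      = @PySem.List.sorted (List String) (List (List Char)) List.instLinearOrder.toLT
          LinearOrder.toDecidableLT xs pvKey false := by
  rw [PySem.List.sorted_eq_foldl_insertBy,
    @PySem.List.sorted_eq_foldl_insertBy (List String) (List (List Char)) List.instLinearOrder.toLT
      LinearOrder.toDecidableLT xs pvKey]
  congr 1
  funext acc x
  congr 1
  funext a b
  exact decide_eq_decide.mpr (pv_lt2 _ _)

-- ===== VERDICT (by name: the statement is the Claim_ definition above) =====
theorem compute_leaf_paths_from_unique_paths_spec : Claim_equal_compute_leaf_paths_from_unique_paths := by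
  unfold Claim_equal_compute_leaf_paths_from_unique_paths
  intro paths _
  unfold Spec_compute_leaf_paths_from_unique_paths
  unfold compute_leaf_paths_from_unique_paths compute_leaf_paths_from_unique_paths_alt
  simp only [pv_foldl_skip, PySem.List.slice_from_one, PySem.List.dedup_eq_ofList,
    PySem.Set.ofList_ofList, PySem.Set.diff, PySem.Set.empty]
  rw [← PySem.Set.ofList_eq_foldl, pv_sorted_eq]
  set P := paths.filter (fun p => !p.isEmpty) with hP
  set U := PySem.Set.ofList P with hU
  apply List.filter_congr
  intro x hxU
  beta_reduce
  congr 1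
  rw [Bool.eq_iff_iff, PySem.Set.contains_iff, PySem.Set.contains_iff]
  -- facts about x and the sorted list
  have hxne : x ≠ [] := by
    rcases List.mem_filter.mp ((PySem.Set.mem_ofList P x).mp hxU) with ⟨-, hne⟩
    simpa using hne
  have hnd : (@PySem.List.sorted (List String) (List (List Char)) List.instLinearOrder.toLT LinearOrder.toDecidableLT U pvKey false).Nodup := (@PySem.List.sorted_perm (List String) (List (List Char)) List.instLinearOrder.toLT LinearOrder.toDecidableLT U pvKey false).symm.nodup
    (PySem.Set.nodup_ofList P)
  have hnd' : List.Pairwise (fun a b : List String => a ≠ b) (@PySem.List.sorted (List String) (List (List Char)) List.instLinearOrder.toLT LinearOrder.toDecidableLT U pvKey false) := hnd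
  have hstrict : (@PySem.List.sorted (List String) (List (List Char)) List.instLinearOrder.toLT LinearOrder.toDecidableLT U pvKey false).Pairwise (fun a b => pvKey a < pvKey b) := by
    refine ((PySem.List.sorted_pairwise U pvKey).and hnd').imp ?_
    rintro a b ⟨hle, hne⟩
    exact lt_of_le_of_ne hle (fun h => hne (pv_key_injective h))
  have hmem : ∀ y : List String, y ∈ (@PySem.List.sorted (List String) (List (List Char)) List.instLinearOrder.toLT LinearOrder.toDecidableLT U pvKey false) ↔ y ∈ U :=
    fun y => @PySem.List.mem_sorted (List String) (List (List Char)) List.instLinearOrder.toLT LinearOrder.toDecidableLT U pvKey false y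
  -- rewrite A's nested loop as one update per path
  rw [show (fun (acc : PySem.Set (List String)) (p : List String) =>
        (PySem.List.pyRange 1 (p.length : Int) 1).foldl
          (fun acc2 i => PySem.Set.add acc2 (PySem.List.slice p none (some i))) acc)
      = (fun acc p => PySem.Set.update acc
          ((PySem.List.pyRange 1 (p.length : Int) 1).map
            (fun i => PySem.List.slice p none (some i)))) from
    funext fun acc => funext fun p => (PySem.Set.update_map_eq_foldl_add _ _ _).symm]
  rw [pv_mem_foldl_update]
  simp only [PySem.Set.mem_ofList, List.mem_map, List.mem_filter, decide_eq_true_eq,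
    List.not_mem_nil, false_or]
  constructor
  · rintro ⟨p, hpU, i, hi, heq⟩
    obtain ⟨hpp1, hpp2⟩ := (pv_range_prefix_iff p x hxne).mp ⟨i, hi, heq.symm⟩
    obtain ⟨pq, hpq, hfst, hpre⟩ :=
      (pv_succ_char (@PySem.List.sorted (List String) (List (List Char)) List.instLinearOrder.toLT LinearOrder.toDecidableLT U pvKey false) hstrict x ((hmem x).mpr hxU)).mp ⟨p, (hmem p).mpr hpU, hpp1, hpp2⟩
    refine ⟨pq, ⟨hpq, ?_⟩, hfst⟩
    rw [hfst]
    exact (pv_slice_pred_iff x pq.2).mpr hpre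
  · rintro ⟨pq, ⟨hpq, hpred⟩, hfst⟩
    have hpre : x <+: pq.2 := by
      rw [← hfst]
      exact (pv_slice_pred_iff pq.1 pq.2).mp hpred
    obtain ⟨q, hq, hqpre, hqne⟩ :=
      (pv_succ_char (@PySem.List.sorted (List String) (List (List Char)) List.instLinearOrder.toLT LinearOrder.toDecidableLT U pvKey false) hstrict x ((hmem x).mpr hxU)).mpr ⟨pq, hpq, hfst, hpre⟩
    obtain ⟨i, hi, heq⟩ := (pv_range_prefix_iff q x hxne).mpr ⟨hqpre, hqne⟩
    exact ⟨q, (hmem q).mp hq, i, hi, heq.symm⟩
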